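-- pv_equiv track=rewrite | github.com/yoshihikosuzuki/kmer-profile | src/_core/_class_rel.py | is_eq_prefix
-- ===== SOURCE A (Python) =====
-- def is_eq_prefix(eqs):
--     if eqs[0] != True:
--         return False
--     i = 1
--     while i < len(eqs) and eqs[i]:
--         i += 1
--     while i < len(eqs):
--         if eqs[i]:
--             return False
--         i += 1
--     return True
-- ===== SOURCE B (Python) =====
-- def is_eq_prefix(eqs):
--     if eqs[0] != True:
--         return False
--     bools = [bool(x) for x in eqs]
--     return all(a >= b for a, b in zip(bools, bools[1:]))
-- ===== Notes on version B (the rewrite author's own statement) =====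
-- stated objective: idiomatic
-- what changed: Replaces A's two-phase index loop (skip the leading truthy run, then verify the rest is falsy) with a single adjacent-pair non-increasing check over zip(bools, bools[1:]); no phase variable or explicit index.
-- outside the precondition, e.g. on is_eq_prefix([]): A raises IndexError, B raises IndexError
import Mathlib
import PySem

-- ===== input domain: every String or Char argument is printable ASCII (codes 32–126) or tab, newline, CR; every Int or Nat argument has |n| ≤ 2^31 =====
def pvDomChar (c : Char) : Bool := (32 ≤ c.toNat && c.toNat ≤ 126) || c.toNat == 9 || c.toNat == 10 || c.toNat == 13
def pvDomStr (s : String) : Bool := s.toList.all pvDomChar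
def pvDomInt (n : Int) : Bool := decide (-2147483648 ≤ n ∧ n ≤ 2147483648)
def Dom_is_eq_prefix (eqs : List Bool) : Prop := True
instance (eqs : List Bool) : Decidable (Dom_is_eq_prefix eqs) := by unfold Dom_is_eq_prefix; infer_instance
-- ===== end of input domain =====

-- B replaces A's two-phase index loop with a single adjacent-pair non-increasing check (idiomatic; return value only).


-- ===== PORT A =====
-- 'while i < len(eqs) and eqs[i]: i += 1' — skip the leading truthy run
def pvSkipTrue : List Bool → List Bool
  | [] => []
  | b :: t => if b then pvSkipTrue t else b :: t

-- 'while i < len(eqs): if eqs[i]: return False; i += 1; return True'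
def pvAllFalse : List Bool → Bool
  | [] => true
  | b :: t => if b then false else pvAllFalse t

def is_eq_prefix (eqs : List Bool) : Bool :=
  match eqs with
  | [] => false  -- unreachable: eqs[0] raises IndexError, excluded by Pre_
  | h :: t => if h != true then false else pvAllFalse (pvSkipTrue t)

-- ===== PORT B =====
-- all(a >= b for a, b in zip(bools, bools[1:])): adjacent pairs non-increasing
def pvNonInc : List Bool → Bool
  | [] => true
  | [_] => true
  | a :: b :: t => (a || !b) && pvNonInc (b :: t)

def is_eq_prefix_alt (eqs : List Bool) : Bool :=
  match eqs with
  | [] => false  -- unreachable: eqs[0] raises IndexError, excluded by Pre_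
  | h :: _ => if h != true then false else pvNonInc eqs

-- ===== PRECONDITION & SPEC =====
-- Both programs evaluate eqs[0], which raises IndexError on the empty list.
def Pre_is_eq_prefix (eqs : List Bool) : Prop := eqs ≠ []
instance (eqs : List Bool) : Decidable (Pre_is_eq_prefix eqs) := by unfold Pre_is_eq_prefix; infer_instance
def pvWitness_is_eq_prefix : List Bool := [true, false]

def Spec_is_eq_prefix (eqs : List Bool) (out : Bool) : Prop := out = is_eq_prefix_alt eqs
instance (eqs : List Bool) (out : Bool) : Decidable (Spec_is_eq_prefix eqs out) := by unfold Spec_is_eq_prefix; infer_instance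

-- ===== CLAIM (what is proved, stated in full; the proofs are below) =====
def Claim_equal_is_eq_prefix : Prop := ∀ (eqs : List Bool), Dom_is_eq_prefix eqs → Pre_is_eq_prefix eqs → Spec_is_eq_prefix eqs (is_eq_prefix eqs)

-- ===== LEMMAS AND PROOFS =====
theorem pvNonInc_false (t : List Bool) : pvNonInc (false :: t) = pvAllFalse t := by
  induction t with
  | nil => rfl
  | cons c t ih =>
    cases c with
    | false => simp [pvNonInc, pvAllFalse] at ih ⊢; exact ih
    | true => simp [pvNonInc, pvAllFalse]

theorem pvNonInc_true (t : List Bool) : pvNonInc (true :: t) = pvAllFalse (pvSkipTrue t) := by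
  induction t with
  | nil => rfl
  | cons b t ih =>
    cases b with
    | true => simpa [pvNonInc, pvSkipTrue] using ih
    | false => simp [pvNonInc, pvSkipTrue, pvAllFalse, pvNonInc_false]

-- ===== VERDICT (by name: the statement is the Claim_ definition above) =====
theorem is_eq_prefix_spec : Claim_equal_is_eq_prefix := by
  intro eqs _ hpre
  unfold Spec_is_eq_prefix
  match eqs with
  | [] => exact absurd rfl hpre
  | h :: t =>
    cases h with
    | false => rfl
    | true => simp [is_eq_prefix, is_eq_prefix_alt, pvNonInc_true]
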